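-- pv_equiv track=rewrite | github.com/AmmarMZ/InterviewPrepQuestions | Week 1/SatisfySubarray.py | satisfySubarrays
-- ===== SOURCE A (Python) =====
-- def satisfySubarrays(input, k):
-- 	# assuming params are validated beforehand and
-- 	# input does not have duplicate entries
--
-- 	kToComplete = k
-- 	numOfSubs = 0
--
--
-- 	for i in range(len(input)):
-- 		kToComplete = k
-- 		if (i%2 != 0):
-- 			kToComplete -= 1
--
-- 		for j in range(i, len(input)):
-- 			# if moving value is odd
-- 			if (j%2 != 0):
-- 				kToComplete -=1
-- 			if (kToComplete == 0):
-- 				numOfSubs += 1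
-- 				kToComplete = 1
--
-- 	return numOfSubs
-- ===== SOURCE B (Python) =====
-- def satisfySubarrays(input, k):
--     # O(n) closed form: for start i, with m = number of odd indices in [i, n),
--     # the inner scan contributes max(0, m-k+1) (i even, k>0), m+1 (i even, k==0),
--     # max(0, m-k+2) (i odd, k>=2), else 0.
--     n = len(input)
--     total = 0
--     m = 0
--     for i in range(n - 1, -1, -1):
--         if i % 2 != 0:
--             m += 1
--             if k >= 2:
--                 total += max(0, m - k + 2)
--         else:
--             if k == 0:
--                 total += m + 1
--             elif k > 0:
--                 total += max(0, m - k + 1)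
--     return total
-- ===== Notes on version B (the rewrite author's own statement) =====
-- stated objective: faster
-- what changed: Replaces A's O(n^2) nested scan (restarting the counter for every subarray start) by a single backward pass that maintains the count m of odd indices in [i, n) and adds a closed-form per-start contribution (max(0, m-k+1) for even i with k>0, m+1 for even i with k==0, max(0, m-k+2) for odd i with k>=2, else 0).
import Mathlib
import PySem

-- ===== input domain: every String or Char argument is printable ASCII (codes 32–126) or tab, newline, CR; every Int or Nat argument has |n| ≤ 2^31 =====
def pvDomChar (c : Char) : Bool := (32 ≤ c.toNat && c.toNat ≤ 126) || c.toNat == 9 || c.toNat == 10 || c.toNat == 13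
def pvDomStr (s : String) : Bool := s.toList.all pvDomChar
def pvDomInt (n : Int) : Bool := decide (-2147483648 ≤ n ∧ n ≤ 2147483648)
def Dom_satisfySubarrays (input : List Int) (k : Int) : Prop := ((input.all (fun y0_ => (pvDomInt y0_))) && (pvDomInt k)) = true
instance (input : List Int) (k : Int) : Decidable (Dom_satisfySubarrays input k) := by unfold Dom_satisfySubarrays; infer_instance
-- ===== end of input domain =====

-- B replaces A's quadratic scan over all subarray starts by a single backward pass that keeps
-- the count m of odd indices in [i, n) and adds a closed-form contribution per start i (objective: faster).

-- ===== PORT A =====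
-- A-side helper: the body of A's inner 'for j' loop; state = (kToComplete, numOfSubs)
def pvInnerA (st : Int × Int) (j : Int) : Int × Int :=
  let kTC := if PySem.Int.mod j 2 ≠ 0 then st.1 - 1 else st.1
  if kTC = 0 then (1, st.2 + 1) else (kTC, st.2)

def satisfySubarrays (input : List Int) (k : Int) : Int :=
  let n := PySem.List.len input
  (PySem.List.pyRange 0 n 1).foldl (fun numOfSubs i =>
    let kToComplete := if PySem.Int.mod i 2 ≠ 0 then k - 1 else k
    ((PySem.List.pyRange i n 1).foldl pvInnerA (kToComplete, numOfSubs)).2) 0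

-- ===== PORT B =====
-- B-side helper: the body of B's backward 'for i' loop; state = (m, total)
def pvStepB (k : Int) (st : Int × Int) (i : Int) : Int × Int :=
  if PySem.Int.mod i 2 ≠ 0 then
    let m := st.1 + 1
    (m, st.2 + (if k ≥ 2 then max 0 (m - k + 2) else 0))
  else
    (st.1, st.2 + (if k = 0 then st.1 + 1 else if 0 < k then max 0 (st.1 - k + 1) else 0))

def satisfySubarrays_alt (input : List Int) (k : Int) : Int :=
  let n := PySem.List.len input
  ((PySem.List.pyRange (n - 1) (-1) (-1)).foldl (pvStepB k) (0, 0)).2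

-- ===== PRECONDITION & SPEC =====
def Spec_satisfySubarrays (input : List Int) (k : Int) (out : Int) : Prop := out = satisfySubarrays_alt input k
instance (input : List Int) (k : Int) (out : Int) : Decidable (Spec_satisfySubarrays input k out) := by unfold Spec_satisfySubarrays; infer_instance

-- ===== CLAIM (what is proved, stated in full; the proofs are below) =====
def Claim_equal_satisfySubarrays : Prop := ∀ (input : List Int) (k : Int), Dom_satisfySubarrays input k → Spec_satisfySubarrays input k (satisfySubarrays input k)

-- ===== LEMMAS AND PROOFS =====

-- Closed form of A's inner scan started with counter c at index i:
-- with m = #odd indices in [i, n), the scan counts max 0 (m - c + 1) if 0 < c,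
-- m + 1 if c = 0 and i is even, and 0 otherwise.
def pvF (c : Int) (ev : Bool) (m : Int) : Int :=
  if 0 < c then max 0 (m - c + 1) else if c = 0 ∧ ev = true then m + 1 else 0

-- B's per-start contribution (mirrors pvStepB's branch values)
def pvContrib (k : Int) (ev : Bool) (m : Int) : Int :=
  if ev then (if k = 0 then m + 1 else if 0 < k then max 0 (m - k + 1) else 0)
  else (if k ≥ 2 then max 0 (m - k + 2) else 0)

-- A's inner loop as structural recursion on Nat indices
def pvUpA (i n : Nat) (st : Int × Int) : Int × Int :=
  if _ : i < n then pvUpA (i + 1) n (pvInnerA st (i : Int)) else st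
termination_by n - i

-- B's backward loop as structural recursion: pvDownB k i st processes indices i-1, …, 0
def pvDownB (k : Int) : Nat → Int × Int → Int × Int
  | 0, st => st
  | i + 1, st => pvDownB k i (pvStepB k st (i : Int))

theorem pvInnerA_fst_ne_zero (st : Int × Int) (j : Int) : (pvInnerA st j).1 ≠ 0 := by
  unfold pvInnerA
  split_ifs <;> simp_all <;> split_ifs <;> simp_all

theorem pvFoldA_eq_upA (i n : Nat) (st : Int × Int) :
    (PySem.List.pyRange (i : Int) (n : Int) 1).foldl pvInnerA st = pvUpA i n st := by
  induction i, st using pvUpA.induct n with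
  | case1 i st hlt ih =>
    rw [PySem.List.pyRange_one_cons (by exact_mod_cast hlt), pvUpA, dif_pos hlt]
    simpa [Int.natCast_succ] using ih
  | case2 i st hge =>
    rw [PySem.List.pyRange_one_eq_nil (by exact_mod_cast Nat.le_of_not_lt hge), pvUpA, dif_neg hge]
    rfl

theorem pvUpA_snd : ∀ (i n : Nat) (st : Int × Int), i ≤ n → (i < n ∨ st.1 ≠ 0) →
    (pvUpA i n st).2 = st.2 + pvF st.1 (decide (i % 2 = 0)) ((n / 2 : Nat) - (i / 2 : Nat) : Int) := by
  intro i n st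
  induction i, st using pvUpA.induct n with
  | case1 i st hlt ih =>
    intro _ _
    rw [pvUpA, dif_pos hlt]
    rw [ih (by omega) (Or.inr (pvInnerA_fst_ne_zero st (i : Int)))]
    have hmod : PySem.Int.mod (i : Int) 2 = ((i % 2 : Nat) : Int) := by
      exact_mod_cast PySem.Int.mod_natCast i 2
    rcases Nat.even_or_odd i with he | ho
    · have hi2 : i % 2 = 0 := Nat.even_iff.mp he
      have hi12 : (i + 1) % 2 = 1 := by omega
      have hdiv : (i + 1) / 2 = i / 2 := by omega
      have hle2 : i / 2 ≤ n / 2 := by omega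
      rw [show pvInnerA st (i : Int) = if st.1 = 0 then (1, st.2 + 1) else (st.1, st.2) from by
        simp [pvInnerA, show ((i : Int)) % 2 = 0 from by omega]]
      by_cases hc : st.1 = 0
      · rw [if_pos hc]
        simp only [pvF, hi12, hi2, hdiv, hc]
        norm_num
        omega
      · rw [if_neg hc]
        simp only [pvF, hi12, hi2, hdiv]
        norm_num
        split_ifs <;> omega
    · have hi2 : i % 2 = 1 := Nat.odd_iff.mp ho
      have hi12 : (i + 1) % 2 = 0 := by omega
      have hdiv : (i + 1) / 2 = i / 2 + 1 := by omega
      have hlt2 : i / 2 < n / 2 := by omega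
      rw [show pvInnerA st (i : Int) = if st.1 - 1 = 0 then (1, st.2 + 1) else (st.1 - 1, st.2) from by
        simp [pvInnerA, show ((i : Int)) % 2 = 1 from by omega]]
      by_cases hc : st.1 - 1 = 0
      · rw [if_pos hc]
        simp only [pvF, hi12, hi2, hdiv]
        norm_num
        split_ifs <;> omega
      · rw [if_neg hc]
        simp only [pvF, hi12, hi2, hdiv]
        norm_num
        split_ifs <;> omega
  | case2 i st hge =>
    intro hle hor
    rw [pvUpA, dif_neg hge]
    have hc : st.1 ≠ 0 := by
      rcases hor with h' | h'
      · omega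
      · exact h'
    simp only [pvF]
    split_ifs with h1 h2
    · omega
    · exact absurd h2.1 hc
    · omega

theorem pvFoldB_eq_downB (k : Int) : ∀ (n : Nat) (st : Int × Int),
    (PySem.List.pyRange ((n : Int) - 1) (-1) (-1)).foldl (pvStepB k) st = pvDownB k n st := by
  intro n
  induction n with
  | zero => intro st; rw [PySem.List.pyRange_neg_one_eq_nil (by omega)]; rfl
  | succ n ih =>
    intro st
    have h1 : ((n : Int) + 1) - 1 = (n : Int) := by ring
    rw [show (((n + 1 : Nat) : Int) - 1) = (n : Int) by push_cast; ring]
    rw [PySem.List.pyRange_neg_one_cons (by omega)]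
    simpa [pvDownB] using ih (pvStepB k st (n : Int))

theorem pvDownB_eval (k : Int) : ∀ (n : Nat) (st : Int × Int),
    pvDownB k n st = (st.1 + (n / 2 : Nat),
      st.2 + ((List.range n).map (fun j =>
        pvContrib k (decide (j % 2 = 0)) (st.1 + ((n / 2 : Nat) : Int) - ((j / 2 : Nat) : Int)))).sum) := by
  intro n
  induction n with
  | zero => intro st; simp [pvDownB]
  | succ n ih =>
    intro st
    have hmod : PySem.Int.mod (n : Int) 2 = ((n % 2 : Nat) : Int) := by
      exact_mod_cast PySem.Int.mod_natCast n 2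
    rw [pvDownB, ih (pvStepB k st (n : Int))]
    rw [List.range_succ, List.map_append, List.sum_append]
    rcases Nat.even_or_odd n with he | ho
    · have hn2 : n % 2 = 0 := Nat.even_iff.mp he
      have hq : (n + 1) / 2 = n / 2 := by omega
      have hstep : pvStepB k st (n : Int) = (st.1, st.2 + pvContrib k true st.1) := by
        simp [pvStepB, pvContrib]
        omega
      rw [hstep, hq]
      simp only [Prod.mk.injEq]
      refine ⟨trivial, ?_⟩
      simp only [hn2, List.map_singleton, List.sum_cons, List.sum_nil]
      rw [show st.1 + ((n / 2 : Nat) : Int) - ((n / 2 : Nat) : Int) = st.1 from by ring]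
      simp
      ring
    · have hn2 : n % 2 = 1 := Nat.odd_iff.mp ho
      have hq : (n + 1) / 2 = n / 2 + 1 := by omega
      have hstep : pvStepB k st (n : Int) = (st.1 + 1, st.2 + pvContrib k false (st.1 + 1)) := by
        simp [pvStepB, pvContrib]
        omega
      rw [hstep, hq]
      simp only [Prod.mk.injEq]
      constructor
      · push_cast; ring
      · have hmap : (List.range n).map (fun j =>
              pvContrib k (decide (j % 2 = 0)) (st.1 + 1 + ((n / 2 : Nat) : Int) - ((j / 2 : Nat) : Int)))
            = (List.range n).map (fun j =>
              pvContrib k (decide (j % 2 = 0)) (st.1 + (((n / 2 + 1 : Nat)) : Int) - ((j / 2 : Nat) : Int))) := by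
          apply List.map_congr_left
          intro j _
          congr 1
          push_cast; ring
        rw [hmap]
        simp only [hn2, List.map_singleton, List.sum_cons, List.sum_nil]
        rw [show st.1 + (((n / 2 + 1 : Nat)) : Int) - ((n / 2 : Nat) : Int) = st.1 + 1 from by push_cast; ring]
        simp
        ring

theorem pvContrib_eq_F (k : Int) (ev : Bool) (m : Int) :
    pvContrib k ev m = pvF (if ev then k else k - 1) ev m := by
  cases ev <;> simp only [pvContrib, pvF] <;> norm_num <;> split_ifs <;> omega

-- ===== VERDICT (by name: the statement is the Claim_ definition above) =====
theorem satisfySubarrays_spec : Claim_equal_satisfySubarrays := by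
  intro input k _
  unfold Spec_satisfySubarrays satisfySubarrays satisfySubarrays_alt
  simp only [PySem.List.len_eq]
  set N := input.length with hN
  rw [pvFoldB_eq_downB k N (0, 0), pvDownB_eval]
  rw [PySem.List.pyRange_zero_natCast, List.foldl_map]
  rw [PySem.List.foldl_congr_mem _ _
      (fun acc (i : Nat) => acc + pvF (if i % 2 = 0 then k else k - 1) (decide (i % 2 = 0))
        (((N / 2 : Nat) : Int) - ((i / 2 : Nat) : Int))) 0 ?_]
  · rw [PySem.List.foldl_add]
    simp only [zero_add]
    congr 1
    apply List.map_congr_left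
    intro j _
    rw [pvContrib_eq_F]
    by_cases h : j % 2 = 0 <;> simp [h]
  · intro acc i hi
    have hiN : i < N := List.mem_range.mp hi
    rw [pvFoldA_eq_upA i N _]
    rw [pvUpA_snd i N _ (by omega) (Or.inl hiN)]
    by_cases h : i % 2 = 0 <;> simp [h] <;>
      [rw [if_neg (show ¬((i : Int) % 2 = 1) from by omega)];
       rw [if_pos (show ((i : Int) % 2 = 1) from by omega)]]
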